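-- pv_equiv track=rewrite | github.com/dhatricds/Medina | src/medina/schedule/detector.py | _page_has_luminaire_schedule
-- ===== SOURCE A (Python) =====
-- def _page_has_luminaire_schedule(
--     text: str,
--     include_keywords: list[str],
--     exclude_keywords: list[str],
-- ) -> bool:
--     """Return True if *text* contains a luminaire-related schedule heading.
--
--     A page qualifies when it matches at least one include keyword and the
--     match is not solely in a region dominated by an exclude keyword.
--     """
--     text_lower = text.lower()
--
--     has_include = any(kw in text_lower for kw in include_keywords)
--     if not has_include:
--         return False
--
--     # If exclude keywords are present we do a simple heuristic: the page
--     # still qualifies as long as at least one include keyword appears in a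
--     # position that is not immediately preceded by an exclude keyword.
--     # For the common case this is sufficient.
--     for exc_kw in exclude_keywords:
--         if exc_kw in text_lower:
--             # Check whether every include-keyword occurrence sits inside
--             # an exclude-keyword region.  If at least one is independent
--             # we keep the page.
--             independent = False
--             for inc_kw in include_keywords:
--                 idx = text_lower.find(inc_kw)
--                 while idx != -1:
--                     # Look backward from the match for the exclude keyword.
--                     preceding = text_lower[max(0, idx - len(exc_kw) - 5): idx]
--                     if exc_kw not in preceding:
--                         independent = True
--                         break
--                     idx = text_lower.find(inc_kw, idx + 1)
--                 if independent:
--                     break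
--             if not independent:
--                 return False
--
--     return True
-- ===== SOURCE B (Python) =====
-- def _page_has_luminaire_schedule(
--     text: str,
--     include_keywords: list[str],
--     exclude_keywords: list[str],
-- ) -> bool:
--     """Hashed offset-scan re-implementation: prefilter the keywords actually
--     present, put them in a hash set keyed by their distinct lengths, then
--     brute-force every text offset once, collecting the offsets where the
--     window of some keyword length is in the set; judge each present exclude
--     keyword against that merged offset list with all/any comprehensions
--     (no find() loops, no early-return loop)."""
--     tl = text.lower()
--     present = [kw for kw in include_keywords if kw in tl]
--     if not present:
--         return False
--     active = [exc for exc in exclude_keywords if exc in tl]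
--     if not active:
--         return True
--     kwset = set(present)
--     lengths = set(len(kw) for kw in present)
--     starts = [j for j in range(len(tl) + 1)
--               if any(tl[j:j + L] in kwset for L in lengths)]
--     return all(
--         any(exc not in tl[max(0, j - len(exc) - 5):j] for j in starts)
--         for exc in active
--     )
-- ===== Notes on version B (the rewrite author's own statement) =====
-- stated objective: alternative
-- what changed: Replaces A's per-keyword find() while-loops with a prefilter of the keywords actually present plus one brute-force scan over every text offset testing length-indexed windows against a hash set of include keywords, producing a merged offset list that each present exclude keyword is judged against with all/any comprehensions.
import Mathlib
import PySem

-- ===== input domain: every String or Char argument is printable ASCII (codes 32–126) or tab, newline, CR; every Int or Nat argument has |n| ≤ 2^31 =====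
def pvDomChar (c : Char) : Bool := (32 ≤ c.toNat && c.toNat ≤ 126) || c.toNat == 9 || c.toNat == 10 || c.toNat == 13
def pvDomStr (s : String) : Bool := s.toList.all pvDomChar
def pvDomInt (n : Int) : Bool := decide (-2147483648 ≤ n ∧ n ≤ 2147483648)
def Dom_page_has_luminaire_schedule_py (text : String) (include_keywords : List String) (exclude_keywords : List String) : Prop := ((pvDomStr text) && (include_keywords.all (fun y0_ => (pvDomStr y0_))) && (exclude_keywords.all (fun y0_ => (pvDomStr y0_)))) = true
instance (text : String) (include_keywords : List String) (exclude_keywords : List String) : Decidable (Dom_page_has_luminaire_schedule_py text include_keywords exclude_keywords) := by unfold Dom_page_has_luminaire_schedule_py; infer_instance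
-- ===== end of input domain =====

-- B replaces A's per-keyword find() loops with a present-keyword prefilter and one
-- brute-force offset scan testing length-indexed windows against a hash set of include
-- keywords, judged by all/any over the merged offset list (objective: alternative).


-- ===== PORT A =====
-- the inner `while idx != -1` loop of A; fuel = tl.length + 2 always suffices
-- (each findFrom start is strictly larger than the previous match index)
def pvAFindLoop (tl inc exc : List Char) : Nat → Int → Bool
  | 0, _ => false
  | fuel+1, idx =>
    if idx = -1 then false
    else
      let preceding := PySem.Chars.slice tl (some (max 0 (idx - (exc.length : Int) - 5))) (some idx)
      if PySem.Chars.isIn exc preceding then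
        pvAFindLoop tl inc exc fuel (PySem.Chars.findFrom tl inc (idx + 1) none)
      else true

-- the `for exc_kw in exclude_keywords` loop of A (early `return False` = stop with false)
def pvAExcLoop (tl : List Char) (include_keywords : List String) : List String → Bool
  | [] => true
  | exc :: rest =>
    if PySem.Chars.isIn exc.toList tl then
      if include_keywords.any (fun inc =>
          pvAFindLoop tl inc.toList exc.toList (tl.length + 2) (PySem.Chars.find tl inc.toList)) then
        pvAExcLoop tl include_keywords rest
      else false
    else pvAExcLoop tl include_keywords rest

def page_has_luminaire_schedule_py (text : String) (include_keywords : List String) (exclude_keywords : List String) : Bool :=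
  let text_lower := PySem.Chars.lower text.toList
  if include_keywords.any (fun kw => PySem.Chars.isIn kw.toList text_lower) then
    pvAExcLoop text_lower include_keywords exclude_keywords
  else false

-- ===== PORT B =====
-- one occurrence offset "independent" of exc: exc not in the preceding window
def pvAltGood (tl exc : List Char) (idx : Int) : Bool :=
  !(PySem.Chars.isIn exc (PySem.Chars.slice tl (some (max 0 (idx - (exc.length : Int) - 5))) (some idx)))

-- B's offset scan: [j for j in range(len(tl)+1) if any(tl[j:j+L] in kwset for L in lengths)]
-- tl[j:j+L] with 0 ≤ j and 0 ≤ L is exactly `(tl.drop j).take L`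
def pvStarts (tl : List Char) (pres : List String) : List Nat :=
  let kwset : PySem.Set (List Char) := PySem.Set.ofList (pres.map (fun kw => kw.toList))
  let lengths : PySem.Set Nat := PySem.Set.ofList (pres.map (fun kw => kw.toList.length))
  (List.range (tl.length + 1)).filter
    (fun j => lengths.any (fun L => PySem.Set.contains kwset ((tl.drop j).take L)))

def page_has_luminaire_schedule_py_alt (text : String) (include_keywords : List String) (exclude_keywords : List String) : Bool :=
  let tl := PySem.Chars.lower text.toList
  let present := include_keywords.filter (fun kw => PySem.Chars.isIn kw.toList tl)
  if present.isEmpty then false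
  else
    let active := exclude_keywords.filter (fun exc => PySem.Chars.isIn exc.toList tl)
    if active.isEmpty then true
    else
      let starts := pvStarts tl present
      active.all (fun exc => starts.any (fun j => pvAltGood tl exc.toList (j : Int)))

-- ===== PRECONDITION & SPEC =====
def Spec_page_has_luminaire_schedule_py (text : String) (include_keywords : List String) (exclude_keywords : List String) (out : Bool) : Prop := out = page_has_luminaire_schedule_py_alt text include_keywords exclude_keywords
instance (text : String) (include_keywords : List String) (exclude_keywords : List String) (out : Bool) : Decidable (Spec_page_has_luminaire_schedule_py text include_keywords exclude_keywords out) := by unfold Spec_page_has_luminaire_schedule_py; infer_instance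

-- ===== CLAIM =====
def Claim_equal_page_has_luminaire_schedule_py : Prop := ∀ (text : String) (include_keywords : List String) (exclude_keywords : List String), Dom_page_has_luminaire_schedule_py text include_keywords exclude_keywords → Spec_page_has_luminaire_schedule_py text include_keywords exclude_keywords (page_has_luminaire_schedule_py text include_keywords exclude_keywords)

-- ===== LEMMAS AND PROOFS =====

-- findFrom past the end of the string is -1
lemma pvFindFrom_past (s sub : List Char) (k : Nat) (h : s.length < k) :
    PySem.Chars.findFrom s sub (k : Int) none = -1 := by
  simp only [PySem.Chars.findFrom]
  rw [if_neg (by omega : ¬((k : Int) < 0)), if_pos (by omega : ((s.length : Int)) < (k : Int))]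

-- characterization of A's find loop
lemma pvAFindLoop_spec (tl inc exc : List Char) :
    ∀ (fuel k : Nat), k ≤ tl.length + 1 → tl.length + 2 - k ≤ fuel →
      (pvAFindLoop tl inc exc fuel (PySem.Chars.findFrom tl inc (k : Int) none) = true
        ↔ ∃ j : Nat, k ≤ j ∧ j ≤ tl.length ∧ inc <+: tl.drop j ∧ pvAltGood tl exc (j : Int) = true) := by
  intro fuel
  induction fuel with
  | zero => intro k hk hf; omega
  | succ fuel ih =>
    intro k hk hf
    by_cases hk' : k ≤ tl.length
    · rw [PySem.Chars.findFrom_natCast tl inc k hk']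
      by_cases hf1 : PySem.Chars.find (tl.drop k) inc = -1
      · rw [if_pos hf1]
        simp only [pvAFindLoop, reduceIte, Bool.false_eq_true, false_iff]
        rintro ⟨j, hjk, hjl, hp, -⟩
        rw [PySem.Chars.find_eq_neg_one_iff] at hf1
        apply hf1
        have hpp : inc <+: (tl.drop k).drop (j - k) := by
          rw [List.drop_drop]
          have heq : k + (j - k) = j := by omega
          rw [heq]; exact hp
        exact hpp.isInfix.trans (List.drop_suffix _ _).isInfix
      · rw [if_neg hf1]
        have hge : 0 ≤ PySem.Chars.find (tl.drop k) inc := by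
          have := PySem.Chars.neg_one_le_find (tl.drop k) inc; omega
        have hspec := PySem.Chars.find_spec (s := tl.drop k) (sub := inc) hge
        have hle := PySem.Chars.find_le_length (tl.drop k) inc
        set f := PySem.Chars.find (tl.drop k) inc with hfdef
        set j0 : Nat := k + f.toNat with hj0
        have hidx : (k : Int) + f = (j0 : Int) := by omega
        have hj0le : j0 ≤ tl.length := by
          rw [List.length_drop] at hle; omega
        have hpre : inc <+: tl.drop j0 := by
          have h1 := hspec.1
          rw [List.drop_drop] at h1
          rw [hj0]
          exact h1
        rw [hidx]
        simp only [pvAFindLoop]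
        rw [if_neg (by omega : ¬((j0 : Int) = -1))]
        by_cases hg : PySem.Chars.isIn exc (PySem.Chars.slice tl (some (max 0 ((j0 : Int) - (exc.length : Int) - 5))) (some (j0 : Int))) = true
        · rw [if_pos hg]
          have hco : (j0 : Int) + 1 = ((j0 + 1 : Nat) : Int) := by push_cast; ring
          rw [hco, ih (j0 + 1) (by omega) (by omega)]
          constructor
          · rintro ⟨j, h1, h2, h3, h4⟩; exact ⟨j, by omega, h2, h3, h4⟩
          · rintro ⟨j, h1, h2, h3, h4⟩
            refine ⟨j, ?_, h2, h3, h4⟩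
            by_contra hlt
            rcases Nat.lt_or_ge j j0 with hj | hj
            · have hmin := hspec.2 (j - k) (by omega)
              rw [List.drop_drop] at hmin
              apply hmin
              have heq : k + (j - k) = j := by omega
              rw [heq]; exact h3
            · have hjj : j = j0 := by omega
              rw [hjj] at h4
              rw [pvAltGood] at h4
              rw [hg] at h4
              simp at h4
        · rw [if_neg hg]
          refine ⟨fun _ => ⟨j0, by omega, hj0le, hpre, ?_⟩, fun _ => rfl⟩
          rw [pvAltGood, Bool.not_eq_true']
          exact Bool.eq_false_iff.mpr hg
    · have hpast := pvFindFrom_past tl inc k (by omega)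
      rw [hpast]
      simp only [pvAFindLoop, reduceIte, Bool.false_eq_true, false_iff]
      rintro ⟨j, h1, h2, -⟩
      omega

-- membership in B's offset list: the hashed window test finds exactly the prefix offsets
lemma pvMem_starts (tl : List Char) (pres : List String) (j : Nat) :
    j ∈ pvStarts tl pres
      ↔ j ≤ tl.length ∧ ∃ inc ∈ pres, inc.toList <+: tl.drop j := by
  simp only [pvStarts, List.mem_filter, List.mem_range, List.any_eq_true,
    PySem.Set.contains_iff, PySem.Set.mem_ofList, List.mem_map]
  refine and_congr (by omega) ⟨?_, ?_⟩
  · rintro ⟨L, -, kw, hm, hkw⟩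
    exact ⟨kw, hm, hkw ▸ List.take_prefix L (tl.drop j)⟩
  · rintro ⟨kw, hm, hp⟩
    exact ⟨kw.toList.length, ⟨kw, hm, rfl⟩, kw, hm, List.prefix_iff_eq_take.mp hp⟩

-- membership in B's offset list over the prefiltered keywords: the filter is invisible
lemma pvMem_starts_pres (tl : List Char) (incs : List String) (j : Nat) :
    j ∈ pvStarts tl (incs.filter (fun kw => PySem.Chars.isIn kw.toList tl))
      ↔ j ≤ tl.length ∧ ∃ inc ∈ incs, inc.toList <+: tl.drop j := by
  rw [pvMem_starts]
  refine and_congr Iff.rfl ⟨?_, ?_⟩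
  · rintro ⟨inc, hm, hp⟩
    exact ⟨inc, (List.mem_filter.mp hm).1, hp⟩
  · rintro ⟨inc, hm, hp⟩
    exact ⟨inc, List.mem_filter.mpr ⟨hm, (PySem.Chars.exists_prefix_drop_iff_isIn _ _).mp ⟨j, hp⟩⟩, hp⟩

-- the include guards agree
lemma pvGuard_eq (tl : List Char) (incs : List String) :
    incs.any (fun kw => PySem.Chars.isIn kw.toList tl)
      = !(incs.filter (fun kw => PySem.Chars.isIn kw.toList tl)).isEmpty := by
  rw [Bool.eq_iff_iff, Bool.not_eq_true', List.isEmpty_eq_false_iff, List.any_eq_true]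
  constructor
  · rintro ⟨kw, hm, hin⟩
    exact List.ne_nil_of_mem (List.mem_filter.mpr ⟨hm, hin⟩)
  · intro hne
    obtain ⟨kw, hkw⟩ := List.exists_mem_of_ne_nil _ hne
    obtain ⟨hm, hin⟩ := List.mem_filter.mp hkw
    exact ⟨kw, hm, hin⟩

-- the "independent" flags agree
lemma pvIndep_eq (tl : List Char) (incs : List String) (e : List Char) :
    incs.any (fun inc => pvAFindLoop tl inc.toList e (tl.length + 2) (PySem.Chars.find tl inc.toList))
      = (pvStarts tl (incs.filter (fun kw => PySem.Chars.isIn kw.toList tl))).any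
          (fun j => pvAltGood tl e (j : Int)) := by
  rw [Bool.eq_iff_iff, List.any_eq_true, List.any_eq_true]
  constructor
  · rintro ⟨inc, hm, hloop⟩
    have h0 := pvAFindLoop_spec tl inc.toList e (tl.length + 2) 0 (by omega) (by omega)
    simp only [Nat.cast_zero, PySem.Chars.findFrom_zero] at h0
    obtain ⟨j, -, h2, h3, h4⟩ := h0.mp hloop
    exact ⟨j, (pvMem_starts_pres tl incs j).mpr ⟨h2, inc, hm, h3⟩, h4⟩
  · rintro ⟨j, hj, hg⟩
    obtain ⟨hle, inc, hm, hp⟩ := (pvMem_starts_pres tl incs j).mp hj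
    refine ⟨inc, hm, ?_⟩
    have h0 := pvAFindLoop_spec tl inc.toList e (tl.length + 2) 0 (by omega) (by omega)
    simp only [Nat.cast_zero, PySem.Chars.findFrom_zero] at h0
    exact h0.mpr ⟨j, Nat.zero_le _, hle, hp, hg⟩

-- A's early-return exclude loop equals B's all over the filtered (present) excludes
lemma pvExcLoop_eq (tl : List Char) (incs : List String) (excs : List String) :
    pvAExcLoop tl incs excs
      = (excs.filter (fun exc => PySem.Chars.isIn exc.toList tl)).all (fun exc =>
          (pvStarts tl (incs.filter (fun kw => PySem.Chars.isIn kw.toList tl))).any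
            (fun j => pvAltGood tl exc.toList (j : Int))) := by
  induction excs with
  | nil => rfl
  | cons e rest ih =>
    simp only [pvAExcLoop, List.filter_cons, pvIndep_eq tl incs e.toList, ih]
    cases h : PySem.Chars.isIn e.toList tl with
    | false => simp only [Bool.false_eq_true, if_false]
    | true =>
      simp only [if_true, List.all_cons]
      cases h2 : (pvStarts tl (incs.filter (fun kw => PySem.Chars.isIn kw.toList tl))).any
          (fun j => pvAltGood tl e.toList (j : Int)) with
      | false => simp only [Bool.false_eq_true, if_false, Bool.false_and]
      | true => simp only [if_true, Bool.true_and]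

-- ===== VERDICT =====
theorem page_has_luminaire_schedule_py_spec : Claim_equal_page_has_luminaire_schedule_py := by
  intro text incs excs _
  unfold Spec_page_has_luminaire_schedule_py
  unfold page_has_luminaire_schedule_py page_has_luminaire_schedule_py_alt
  simp only [pvGuard_eq, pvExcLoop_eq]
  set tl := PySem.Chars.lower text.toList
  by_cases h : (incs.filter (fun kw => PySem.Chars.isIn kw.toList tl)).isEmpty = true
  · simp [h]
  · simp only [h, Bool.false_eq_true, if_false, Bool.not_false, if_true]
    by_cases h2 : (excs.filter (fun exc => PySem.Chars.isIn exc.toList tl)).isEmpty = true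
    · rw [List.isEmpty_iff.mp h2]; simp
    · simp [h2]
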